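-- pv_equiv track=rewrite | github.com/RoblabWh/ROSHAN | src/pysim/utils.py | get_in_features_2d
-- ===== SOURCE A (Python) =====
-- def get_in_features_2d(h_in, w_in, layers_dict):
--     for layer in layers_dict:
--         padding = layer['padding']
--         dilation = layer['dilation']
--         kernel_size = layer['kernel_size']
--         stride = layer['stride']
--
--         h_in = ((h_in + 2 * padding[0] - dilation[0] * (kernel_size[0] - 1) - 1) // stride[0]) + 1
--         w_in = ((w_in + 2 * padding[1] - dilation[1] * (kernel_size[1] - 1) - 1) // stride[1]) + 1
--
--     return h_in * w_in
-- ===== SOURCE B (Python) =====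
-- def _step(size, layer, axis):
--     # one conv layer applied to one spatial axis
--     return ((size + 2 * layer['padding'][axis]
--              - layer['dilation'][axis] * (layer['kernel_size'][axis] - 1)
--              - 1) // layer['stride'][axis]) + 1
--
--
-- def get_in_features_2d(h_in, w_in, layers_dict):
--     # recursion on the layer list instead of a loop
--     if not layers_dict:
--         return h_in * w_in
--     layer = layers_dict[0]
--     return get_in_features_2d(_step(h_in, layer, 0),
--                               _step(w_in, layer, 1),
--                               layers_dict[1:])
-- ===== Notes on version B (the rewrite author's own statement) =====
-- stated objective: alternative
-- what changed: Replaces A's single imperative loop that mutates h and w with a structural recursion on the layer list (base case returns the product, the step peels one layer via a shared one-axis helper).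
import Mathlib
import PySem

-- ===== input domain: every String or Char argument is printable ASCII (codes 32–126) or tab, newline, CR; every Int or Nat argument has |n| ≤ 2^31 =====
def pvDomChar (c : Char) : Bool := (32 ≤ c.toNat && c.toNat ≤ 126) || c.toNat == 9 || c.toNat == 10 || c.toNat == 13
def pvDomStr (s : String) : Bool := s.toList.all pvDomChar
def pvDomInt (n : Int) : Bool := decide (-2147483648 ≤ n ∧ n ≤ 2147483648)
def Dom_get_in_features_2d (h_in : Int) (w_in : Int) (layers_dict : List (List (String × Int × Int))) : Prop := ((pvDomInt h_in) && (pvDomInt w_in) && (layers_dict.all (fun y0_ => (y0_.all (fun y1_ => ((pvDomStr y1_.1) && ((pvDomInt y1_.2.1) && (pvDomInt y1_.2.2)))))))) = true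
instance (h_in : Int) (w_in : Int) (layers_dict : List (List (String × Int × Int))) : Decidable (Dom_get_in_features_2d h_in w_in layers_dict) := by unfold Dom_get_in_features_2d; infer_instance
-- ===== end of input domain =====

-- ===== PORT A =====
-- B re-decomposes A: structural recursion on the layer list with a one-axis step helper, instead of A's loop mutating h and w.
-- first-match association-list lookup for layer['k']; Pre_ guarantees the key is present, so the default is never used
def pvLookupD (layer : List (String × Int × Int)) (k : String) : Int × Int :=
  match layer.find? (fun p => p.1 == k) with
  | some p => p.2
  | none => (0, 0)

def get_in_features_2d (h_in : Int) (w_in : Int) (layers_dict : List (List (String × Int × Int))) : Int :=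
  let hw := layers_dict.foldl (fun (hw : Int × Int) layer =>
    let padding := pvLookupD layer "padding"
    let dilation := pvLookupD layer "dilation"
    let kernel_size := pvLookupD layer "kernel_size"
    let stride := pvLookupD layer "stride"
    (PySem.Int.floordiv (hw.1 + 2 * padding.1 - dilation.1 * (kernel_size.1 - 1) - 1) stride.1 + 1,
     PySem.Int.floordiv (hw.2 + 2 * padding.2 - dilation.2 * (kernel_size.2 - 1) - 1) stride.2 + 1))
    (h_in, w_in)
  hw.1 * hw.2

-- ===== PORT B =====
-- tuple indexing p[axis]; exact for axis = 0 and axis = 1, the only values B passes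
def pvSel (p : Int × Int) (axis : Int) : Int :=
  if axis == 0 then p.1 else p.2

-- one conv layer applied to one spatial axis (B's _step)
def pvStep (size : Int) (layer : List (String × Int × Int)) (axis : Int) : Int :=
  PySem.Int.floordiv
    (size + 2 * pvSel (pvLookupD layer "padding") axis
       - pvSel (pvLookupD layer "dilation") axis * (pvSel (pvLookupD layer "kernel_size") axis - 1)
       - 1)
    (pvSel (pvLookupD layer "stride") axis) + 1

def get_in_features_2d_alt (h_in : Int) (w_in : Int) (layers_dict : List (List (String × Int × Int))) : Int :=
  match layers_dict with
  | [] => h_in * w_in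
  | layer :: rest => get_in_features_2d_alt (pvStep h_in layer 0) (pvStep w_in layer 1) rest

-- ===== PRECONDITION & SPEC =====
-- Pre_ excludes exactly the inputs on which Python A raises: a layer missing one of the four
-- keys (KeyError) or with a zero stride component (ZeroDivisionError).
def Pre_get_in_features_2d (h_in : Int) (w_in : Int) (layers_dict : List (List (String × Int × Int))) : Prop :=
  ∀ layer ∈ layers_dict,
    (layer.find? (fun p => p.1 == "padding")).isSome ∧
    (layer.find? (fun p => p.1 == "dilation")).isSome ∧
    (layer.find? (fun p => p.1 == "kernel_size")).isSome ∧
    (layer.find? (fun p => p.1 == "stride")).isSome ∧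
    (pvLookupD layer "stride").1 ≠ 0 ∧ (pvLookupD layer "stride").2 ≠ 0
instance (h_in : Int) (w_in : Int) (layers_dict : List (List (String × Int × Int))) : Decidable (Pre_get_in_features_2d h_in w_in layers_dict) := by unfold Pre_get_in_features_2d; infer_instance

def pvWitness_get_in_features_2d : Int × Int × (List (List (String × Int × Int))) :=
  (8, 8, [[("padding", (1, 1)), ("dilation", (1, 1)), ("kernel_size", (3, 3)), ("stride", (2, 2))]])

def Spec_get_in_features_2d (h_in : Int) (w_in : Int) (layers_dict : List (List (String × Int × Int))) (out : Int) : Prop := out = get_in_features_2d_alt h_in w_in layers_dict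
instance (h_in : Int) (w_in : Int) (layers_dict : List (List (String × Int × Int))) (out : Int) : Decidable (Spec_get_in_features_2d h_in w_in layers_dict out) := by unfold Spec_get_in_features_2d; infer_instance

-- ===== CLAIM (what is proved, stated in full; the proofs are below) =====
def Claim_equal_get_in_features_2d : Prop := ∀ (h_in : Int) (w_in : Int) (layers_dict : List (List (String × Int × Int))), Dom_get_in_features_2d h_in w_in layers_dict → Pre_get_in_features_2d h_in w_in layers_dict → Spec_get_in_features_2d h_in w_in layers_dict (get_in_features_2d h_in w_in layers_dict)

-- ===== LEMMAS AND PROOFS =====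
-- A's paired fold over the layers computes what B's recursion computes.
theorem pv_fold_rec (layers_dict : List (List (String × Int × Int))) (h w : Int) :
    (List.foldl (fun (hw : Int × Int) layer =>
      let padding := pvLookupD layer "padding"
      let dilation := pvLookupD layer "dilation"
      let kernel_size := pvLookupD layer "kernel_size"
      let stride := pvLookupD layer "stride"
      (PySem.Int.floordiv (hw.1 + 2 * padding.1 - dilation.1 * (kernel_size.1 - 1) - 1) stride.1 + 1,
       PySem.Int.floordiv (hw.2 + 2 * padding.2 - dilation.2 * (kernel_size.2 - 1) - 1) stride.2 + 1))
      (h, w) layers_dict).1 *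
    (List.foldl (fun (hw : Int × Int) layer =>
      let padding := pvLookupD layer "padding"
      let dilation := pvLookupD layer "dilation"
      let kernel_size := pvLookupD layer "kernel_size"
      let stride := pvLookupD layer "stride"
      (PySem.Int.floordiv (hw.1 + 2 * padding.1 - dilation.1 * (kernel_size.1 - 1) - 1) stride.1 + 1,
       PySem.Int.floordiv (hw.2 + 2 * padding.2 - dilation.2 * (kernel_size.2 - 1) - 1) stride.2 + 1))
      (h, w) layers_dict).2
    = get_in_features_2d_alt h w layers_dict := by
  induction layers_dict generalizing h w with
  | nil => rfl
  | cons layer rest ih =>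
    simp only [List.foldl_cons, get_in_features_2d_alt, pvStep, pvSel]
    exact ih _ _

-- ===== VERDICT (by name: the statement is the Claim_ definition above) =====
theorem get_in_features_2d_spec : Claim_equal_get_in_features_2d := by
  intro h_in w_in layers_dict _ _
  show get_in_features_2d h_in w_in layers_dict = get_in_features_2d_alt h_in w_in layers_dict
  exact pv_fold_rec layers_dict h_in w_in
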